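-- pv_equiv track=rewrite | github.com/jethridge13/AdventOfCode2017 | Day6.py | calc
-- ===== SOURCE A (Python) =====
-- import copy
--
-- def calc(array):
-- 	l = [copy.deepcopy(array)]
-- 	n = 0
-- 	while True:
-- 		array = redis(array)
-- 		if array in l:
-- 			return n + 1
-- 		l.append(copy.deepcopy(array))
-- 		n += 1
-- 	return -1
--
-- def redis(array):
-- 	# maxTup[0] = index
-- 	# maxTup[1] = value
-- 	maxTup = (-1, -1)
-- 	for i in range(len(array)):
-- 		if array[i] > maxTup[1]:
-- 			maxTup = (i, array[i])
-- 	n = array[maxTup[0]]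
-- 	array[maxTup[0]] = 0
-- 	i = maxTup[0] + 1
-- 	while n > 0:
-- 		if i >= len(array):
-- 			i = 0
-- 		array[i] += 1
-- 		n -= 1
-- 		i += 1
-- 	return array
-- ===== SOURCE B (Python) =====
-- def calc(array):
--     seen = [list(array)]
--     n = 0
--     while True:
--         array = redis(array)
--         if array in seen:
--             return n + 1
--         seen.append(list(array))
--         n += 1
--
-- def redis(array):
--     # distribute the first maximum's blocks arithmetically: base share to every
--     # slot, one extra to the first (blocks % L) slots after the maximum, wrapping
--     L = len(array)
--     m = array.index(max(array))
--     blocks = array[m]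
--     array[m] = 0
--     if blocks > 0:
--         base, rem = divmod(blocks, L)
--         array[:] = [x + base for x in array]
--         for k in range(rem):
--             array[(m + 1 + k) % L] += 1
--     return array
-- ===== Notes on version B (the rewrite author's own statement) =====
-- stated objective: faster
-- what changed: redis distributes the maximum's blocks in closed form (divmod base share to all slots plus one extra to the first blocks%L slots after the maximum, wrapping) instead of dropping blocks one at a time, so each redistribution step costs O(L) instead of O(max value); the outer repeat-detection loop is kept.
import Mathlib
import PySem

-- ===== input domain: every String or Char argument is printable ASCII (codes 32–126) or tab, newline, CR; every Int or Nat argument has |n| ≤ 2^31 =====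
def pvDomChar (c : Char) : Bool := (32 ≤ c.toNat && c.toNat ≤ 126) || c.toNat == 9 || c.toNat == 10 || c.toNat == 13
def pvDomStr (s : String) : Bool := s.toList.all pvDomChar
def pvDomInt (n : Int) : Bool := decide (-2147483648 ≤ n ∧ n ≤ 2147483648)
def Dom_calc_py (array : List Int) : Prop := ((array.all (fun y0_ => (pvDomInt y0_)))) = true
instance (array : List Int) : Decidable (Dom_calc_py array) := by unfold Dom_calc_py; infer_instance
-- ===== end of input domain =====

-- B rewrites redis to distribute the maximum's blocks in closed form (divmod) instead of one
-- block at a time (objective: faster per redistribution step).  Both Pythons mutate the argument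
-- list in place; the equivalence proved here is about the RETURN value only.
-- The unbounded 'while True' loop of calc is ported with the same fuel bound (pvFuel) on both
-- sides; the dead 'return -1' after A's loop is the fuel-exhaustion value.

-- ===== PORT A =====
-- in-place 'array[i] = v' for an index Python accepts (-len ≤ i < len); exact there
def pySet (xs : List Int) (i : Int) (v : Int) : List Int :=
  if i < 0 then xs.set (i + xs.length).toNat v else xs.set i.toNat v

-- the 'while n > 0' block-dropping loop of A's redis
def distA (array : List Int) (n : Int) (i : Int) : List Int :=
  if 0 < n then
    let i' := if (array.length : Int) ≤ i then 0 else i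
    distA (pySet array i' (PySem.List.pyGetD array i' 0 + 1)) (n - 1) (i' + 1)
  else array
termination_by n.toNat
decreasing_by omega

def redisA (array : List Int) : List Int :=
  -- for i in range(len(array)): indices are in range, so the pyGetD default is never used;
  -- maxTup.1 may remain -1 (all values ≤ -1): pyGetD/pySet then wrap to the last slot like Python
  let maxTup := (PySem.List.pyRange 0 (array.length : Int)).foldl
    (fun t i => if PySem.List.pyGetD array i 0 > t.2 then (i, PySem.List.pyGetD array i 0) else t)
    (-1, -1)
  let n := PySem.List.pyGetD array maxTup.1 0
  let array1 := pySet array maxTup.1 0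
  distA array1 n (maxTup.1 + 1)

-- fuel for the unbounded 'while True' loop (same bound on both sides)
def pvFuel : Nat := 2 ^ 64

def calcLoopA (l : List (List Int)) (array : List Int) (n : Int) : Nat → Int
  | 0 => -1   -- Python's (dead) 'return -1' fallthrough
  | fuel + 1 =>
    let array' := redisA array
    if array' ∈ l then n + 1
    else calcLoopA (l ++ [array']) array' (n + 1) fuel

def calc_py (array : List Int) : Int := calcLoopA [array] array 0 pvFuel

-- ===== PORT B =====
def redisB (array : List Int) : List Int :=
  match PySem.List.max? array (fun x => x) with
  | none => array      -- empty list: Python B raises ValueError here; outside Pre_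
  | some mx =>
    let L : Int := array.length
    let m : Nat := (PySem.List.index? array mx).getD 0   -- mx ∈ array, so index? is some
    let blocks := array.getD m 0
    let array1 := array.set m 0
    if 0 < blocks then
      let base := PySem.Int.floordiv blocks L
      let rem := PySem.Int.mod blocks L
      let array2 := array1.map (fun x => x + base)    -- array[:] = [x + base for x in array]
      (PySem.List.pyRange 0 rem).foldl
        (fun a k =>
          pySet a (PySem.Int.mod ((m : Int) + 1 + k) L)
            (PySem.List.pyGetD a (PySem.Int.mod ((m : Int) + 1 + k) L) 0 + 1)) array2
    else array1

def calcLoopB (l : List (List Int)) (array : List Int) (n : Int) : Nat → Int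
  | 0 => -1
  | fuel + 1 =>
    let array' := redisB array
    if array' ∈ l then n + 1
    else calcLoopB (l ++ [array']) array' (n + 1) fuel

def calc_py_alt (array : List Int) : Int := calcLoopB [array] array 0 pvFuel

-- ===== PRECONDITION & SPEC =====
-- Python A raises IndexError on the empty list (and B ValueError); nothing else is excluded.
def Pre_calc_py (array : List Int) : Prop := array ≠ []
instance (array : List Int) : Decidable (Pre_calc_py array) := by unfold Pre_calc_py; infer_instance
def pvWitness_calc_py : List Int := [0, 2, 7, 0]

def Spec_calc_py (array : List Int) (out : Int) : Prop := out = calc_py_alt array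
instance (array : List Int) (out : Int) : Decidable (Spec_calc_py array out) := by unfold Spec_calc_py; infer_instance

-- ===== CLAIM (what is proved, stated in full; the proofs are below) =====
def Claim_equal_calc_py : Prop := ∀ (array : List Int), Dom_calc_py array → Pre_calc_py array → Spec_calc_py array (calc_py array)

-- ===== LEMMAS AND PROOFS =====

def cnt (L n s j : Int) : Int := n / L + (if (j - s) % L < n % L then 1 else 0)

theorem emod_cases (L x : Int) (hL : 0 < L) (h1 : -L ≤ x) (h2 : x < L) :
    x % L = x ∨ x % L = x + L := by
  by_cases hx : 0 ≤ x
  · exact Or.inl (Int.emod_eq_of_lt hx h2)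
  · refine Or.inr ?_
    have e : (x + L) % L = x % L := by
      rw [show x = (x + L) - L by ring, Int.sub_emod_right]; ring_nf
    rw [← e, Int.emod_eq_of_lt (by omega) (by omega)]

theorem cnt_step' (L i' j k : Int) (hL : 0 < L) (hi'0 : 0 ≤ i') (hi'L : i' < L)
    (hj0 : 0 ≤ j) (hjL : j < L) (hk : 0 ≤ k) :
    cnt L (k + 1) i' j = (if j = i' then 1 else 0) + cnt L k (i' + 1) j := by
  unfold cnt
  obtain ⟨d, hd⟩ : ∃ d, (j - i') % L = d := ⟨_, rfl⟩
  have hd3 : d = j - i' ∨ d = j - i' + L := hd ▸ emod_cases L (j - i') hL (by omega) (by omega)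
  have hd0 : 0 ≤ d := hd ▸ Int.emod_nonneg _ (by omega)
  have hdL : d < L := hd ▸ Int.emod_lt_of_pos _ hL
  have e1 : j - (i' + 1) = (j - i') - 1 := by ring
  have hd2 : (j - (i' + 1)) % L = (if d = 0 then L - 1 else d - 1) := by
    have hb1 : -L ≤ j - i' - 1 := by omega
    have hb2 : j - i' - 1 < L := by omega
    have g0 : 0 ≤ (j - i' - 1) % L := Int.emod_nonneg _ (by omega)
    have gL : (j - i' - 1) % L < L := Int.emod_lt_of_pos _ hL
    rcases emod_cases L (j - i' - 1) hL hb1 hb2 with g2 | g2 <;>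
      rcases hd3 with h3 | h3 <;> rw [e1, g2]
    all_goals (split_ifs <;> omega)
  have hjiff : (j = i') ↔ (d = 0) := by rcases hd3 with h3 | h3 <;> omega
  have hkdm' : k / L * L + k % L = k := by
    have := Int.ediv_add_emod k L; rw [mul_comm] at this; exact this
  have hr0 : 0 ≤ k % L := Int.emod_nonneg k (by omega)
  have hrL : k % L < L := Int.emod_lt_of_pos k hL
  rw [hd, hd2]
  by_cases hcase : k % L = L - 1
  · have e2 : k + 1 = (k / L + 1) * L := by rw [add_mul, one_mul]; omega
    have hdiv : (k + 1) / L = k / L + 1 := by rw [e2, Int.mul_ediv_cancel _ (by omega)]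
    have hmod : (k + 1) % L = 0 := by rw [e2, Int.mul_emod_left]
    rw [hdiv, hmod, hcase]
    split_ifs <;> omega
  · have e2a : k + 1 = (k % L + 1) + k / L * L := by omega
    have e2b : k + 1 = (k % L + 1) + L * (k / L) := by rw [mul_comm L (k / L)]; exact e2a
    have hdiv : (k + 1) / L = k / L := by
      rw [e2a, Int.add_mul_ediv_right _ _ (by omega : L ≠ 0),
        Int.ediv_eq_zero_of_lt (by omega) (by omega)]
      ring
    have hmod : (k + 1) % L = k % L + 1 := by
      rw [e2b, Int.add_mul_emod_self_left, Int.emod_eq_of_lt (by omega) (by omega)]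
    rw [hdiv, hmod]
    split_ifs <;> omega

theorem cnt_step (L i j k : Int) (hL : 0 < L) (hi0 : 0 ≤ i) (hiL : i ≤ L)
    (hj0 : 0 ≤ j) (hjL : j < L) (hk : 0 ≤ k) :
    cnt L (k + 1) i j
      = (if j = (if L ≤ i then 0 else i) then 1 else 0)
        + cnt L k ((if L ≤ i then 0 else i) + 1) j := by
  by_cases hI : L ≤ i
  · rw [if_pos hI]
    have hiL' : i = L := by omega
    have : cnt L (k + 1) i j = cnt L (k + 1) 0 j := by
      unfold cnt
      rw [hiL', show j - L = (j - 0) - L by ring, Int.sub_emod_right]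
    rw [this]
    exact cnt_step' L 0 j k hL (by omega) (by omega) hj0 hjL hk
  · rw [if_neg hI]
    exact cnt_step' L i j k hL hi0 (by omega) hj0 hjL hk
theorem pySet_natCast (xs : List Int) (i : Nat) (v : Int) : pySet xs (i : Int) v = xs.set i v := by
  simp [pySet]

theorem pyGetD_neg_one (xs : List Int) (h : xs ≠ []) (d : Int) :
    PySem.List.pyGetD xs (-1) d = xs.getD (xs.length - 1) d := by
  have hl : 0 < xs.length := List.length_pos_iff.mpr h
  unfold PySem.List.pyGetD PySem.List.pyGet? PySem.List.pyIdx?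
  rw [if_neg (by omega), if_pos (show -(xs.length:Int) ≤ -1 by omega)]
  simp [List.getD_eq_getElem?_getD]

theorem pySet_neg_one (xs : List Int) (v : Int) :
    pySet xs (-1) v = xs.set (xs.length - 1) v := by
  unfold pySet
  rw [if_pos (by omega)]
  congr 1
  omega

theorem getD_set (xs : List Int) (i j : Nat) (v : Int) (hj : j < xs.length) :
    (xs.set i v).getD j 0 = if i = j then v else xs.getD j 0 := by
  rw [List.getD_eq_getElem _ _ (by simpa using hj), List.getD_eq_getElem _ _ hj]
  rw [List.getElem_set]

theorem distA_getD (k : Nat) : ∀ (arr : List Int) (i : Int), 0 < arr.length →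
    0 ≤ i → i ≤ (arr.length : Int) →
    (distA arr (k : Int) i).length = arr.length ∧
    ∀ j : Nat, j < arr.length →
      (distA arr (k : Int) i).getD j 0 = arr.getD j 0 + cnt (arr.length : Int) (k : Int) i (j : Int) := by
  induction k with
  | zero =>
    intro arr i hl hi0 hiL
    rw [distA, if_neg (by omega)]
    refine ⟨rfl, fun j hj => ?_⟩
    have h0 : 0 ≤ ((j : Int) - i) % (arr.length : Int) := Int.emod_nonneg _ (by omega)
    unfold cnt
    push_cast
    rw [Int.zero_ediv, Int.zero_emod, if_neg (by omega)]
    ring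
  | succ k ih =>
    intro arr i hl hi0 hiL
    have hcast : ((k + 1 : Nat) : Int) = (k : Int) + 1 := by push_cast; ring
    rw [hcast, distA, if_pos (show (0:Int) < (k : Int) + 1 by omega)]
    simp only []
    set i' : Int := if (arr.length : Int) ≤ i then 0 else i with hi'def
    have hi'0 : 0 ≤ i' := by rw [hi'def]; split <;> omega
    have hi'L : i' < (arr.length : Int) := by rw [hi'def]; split <;> omega
    have hi'cast : i' = ((i'.toNat : Nat) : Int) := by omega
    have hget : PySem.List.pyGetD arr i' 0 = arr.getD i'.toNat 0 := by
      have h2 := PySem.List.pyGetD_natCast arr i'.toNat (0 : Int)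
      rw [← hi'cast] at h2
      exact h2
    have hset : pySet arr i' (PySem.List.pyGetD arr i' 0 + 1)
        = arr.set i'.toNat (arr.getD i'.toNat 0 + 1) := by
      rw [hget]
      have h2 := pySet_natCast arr i'.toNat (arr.getD i'.toNat 0 + 1)
      rw [← hi'cast] at h2
      exact h2
    rw [show (k : Int) + 1 - 1 = (k : Int) by ring, hset]
    have hlen' : (arr.set i'.toNat (arr.getD i'.toNat 0 + 1)).length = arr.length := by
      simp
    obtain ⟨ihlen, ihget⟩ := ih (arr.set i'.toNat (arr.getD i'.toNat 0 + 1)) (i' + 1)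
      (by omega) (by omega) (by rw [hlen']; omega)
    constructor
    · rw [ihlen, hlen']
    · intro j hj
      rw [ihget j (by omega), hlen']
      rw [getD_set _ _ _ _ hj]
      have hstep := cnt_step (arr.length : Int) i (j : Int) (k : Int) (by omega) hi0 hiL
        (by omega) (by omega) (by omega)
      rw [← hi'def] at hstep
      rw [hstep]
      by_cases he : i'.toNat = j
      · rw [if_pos he, if_pos (by omega), he]; ring
      · rw [if_neg he, if_neg (by omega)]; ring

theorem remFold_getD (m : Nat) (L : Int) (r : Nat) : ∀ (a : List Int), L = (a.length : Int) →
    ((m : Int) + 1) ≤ L → (r : Int) ≤ L →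
    (((PySem.List.pyRange 0 (r : Int)).foldl
        (fun a k =>
          pySet a (PySem.Int.mod ((m : Int) + 1 + k) L)
            (PySem.List.pyGetD a (PySem.Int.mod ((m : Int) + 1 + k) L) 0 + 1)) a).length = a.length) ∧
    ∀ j : Nat, j < a.length →
      ((PySem.List.pyRange 0 (r : Int)).foldl
        (fun a k =>
          pySet a (PySem.Int.mod ((m : Int) + 1 + k) L)
            (PySem.List.pyGetD a (PySem.Int.mod ((m : Int) + 1 + k) L) 0 + 1)) a).getD j 0
        = a.getD j 0 + (if ((j : Int) - ((m : Int) + 1)) % L < (r : Int) then 1 else 0) := by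
  induction r with
  | zero =>
    intro a hL hm hr
    rw [show ((0 : Nat) : Int) = 0 by rfl]
    rw [show PySem.List.pyRange 0 0 = [] from rfl]
    refine ⟨rfl, fun j hj => ?_⟩
    have hd0 : 0 ≤ ((j : Int) - ((m : Int) + 1)) % L := Int.emod_nonneg _ (by omega)
    rw [List.foldl_nil, if_neg (by omega)]
    ring
  | succ r ih =>
    intro a hL hm hr
    have hL0 : 0 < L := by omega
    have hcast : ((r + 1 : Nat) : Int) = (r : Int) + 1 := by push_cast; ring
    rw [hcast, PySem.List.pyRange_one_succ_right (by omega), List.foldl_append, List.foldl_cons,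
      List.foldl_nil]
    obtain ⟨ihlen, ihget⟩ := ih a hL hm (by omega)
    set A := (PySem.List.pyRange 0 (r : Int)).foldl
        (fun a k =>
          pySet a (PySem.Int.mod ((m : Int) + 1 + k) L)
            (PySem.List.pyGetD a (PySem.Int.mod ((m : Int) + 1 + k) L) 0 + 1)) a with hA
    have hmod : PySem.Int.mod ((m : Int) + 1 + (r : Int)) L = ((m : Int) + 1 + (r : Int)) % L :=
      PySem.Int.mod_eq_emod_of_pos hL0
    have hsub : ((m : Int) + 1 + (r : Int)) % L = ((m : Int) + 1 + (r : Int) - L) % L :=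
      (Int.sub_emod_right _ _).symm
    set p : Int := ((m : Int) + 1 + (r : Int)) % L with hpdef
    have hp0 : 0 ≤ p := Int.emod_nonneg _ (by omega)
    have hpL : p < L := Int.emod_lt_of_pos _ hL0
    have hp3 : p = (m : Int) + 1 + (r : Int) ∨ p = (m : Int) + 1 + (r : Int) - L := by
      rcases emod_cases L ((m : Int) + 1 + (r : Int) - L) hL0 (by omega) (by omega) with g | g
      · right; rw [hsub, g]
      · left; rw [hsub, g]; ring
    have hplen : p < (A.length : Int) := by rw [ihlen]; omega
    have hpcast : p = ((p.toNat : Nat) : Int) := by omega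
    have hget : PySem.List.pyGetD A p 0 = A.getD p.toNat 0 := by
      have h2 := PySem.List.pyGetD_natCast A p.toNat (0 : Int)
      rw [← hpcast] at h2
      exact h2
    have hset : pySet A p (PySem.List.pyGetD A p 0 + 1) = A.set p.toNat (A.getD p.toNat 0 + 1) := by
      rw [hget]
      have h2 := pySet_natCast A p.toNat (A.getD p.toNat 0 + 1)
      rw [← hpcast] at h2
      exact h2
    rw [hmod, hset]
    constructor
    · rw [List.length_set, ihlen]
    · intro j hj
      have hjA : j < A.length := by rw [ihlen]; exact hj
      rw [getD_set _ _ _ _ hjA, ihget j hj]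
      have hd3 : ((j : Int) - ((m : Int) + 1)) % L = (j : Int) - ((m : Int) + 1) ∨
          ((j : Int) - ((m : Int) + 1)) % L = (j : Int) - ((m : Int) + 1) + L :=
        emod_cases L _ hL0 (by omega) (by omega)
      have hd0 : 0 ≤ ((j : Int) - ((m : Int) + 1)) % L := Int.emod_nonneg _ (by omega)
      have hdL : ((j : Int) - ((m : Int) + 1)) % L < L := Int.emod_lt_of_pos _ hL0
      by_cases he : p.toNat = j
      · rw [if_pos he, he, ihget j hj]
        rcases hd3 with g | g <;> rcases hp3 with g2 | g2 <;> split_ifs <;> omega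
      · rw [if_neg he]
        have hne : ((j : Int)) ≠ p := by omega
        have heq : (if ((j : Int) - ((m : Int) + 1)) % L < (r : Int) then (1:Int) else 0)
            = (if ((j : Int) - ((m : Int) + 1)) % L < (r : Int) + 1 then (1:Int) else 0) := by
          rcases hd3 with g | g <;> rcases hp3 with g2 | g2 <;> split_ifs <;> omega
        rw [← heq]

-- characterisation of the running-max fold over the indices [0, len)
theorem goA_spec (arr : List Int) (len : Nat) :
    ((∀ k < len, arr.getD k 0 ≤ -1) ∧
      (List.range len).foldl
        (fun t i => if arr.getD i 0 > t.2 then ((i : Int), arr.getD i 0) else t)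
        (-1, -1) = (-1, -1)) ∨
    (∃ j < len, -1 < arr.getD j 0 ∧
      (List.range len).foldl
        (fun t i => if arr.getD i 0 > t.2 then ((i : Int), arr.getD i 0) else t)
        (-1, -1) = ((j : Int), arr.getD j 0) ∧
      (∀ k < j, arr.getD k 0 < arr.getD j 0) ∧
      (∀ k < len, arr.getD k 0 ≤ arr.getD j 0)) := by
  induction len with
  | zero => exact Or.inl ⟨by omega, rfl⟩
  | succ len ih =>
    rw [List.range_succ, List.foldl_append, List.foldl_cons, List.foldl_nil]
    rcases ih with ⟨hall, heq⟩ | ⟨j, hj, hx, heq, hstrict, hmax⟩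
    · rw [heq]
      by_cases hc : arr.getD len 0 > (-1 : Int)
      · refine Or.inr ⟨len, by omega, hc, ?_, ?_, ?_⟩
        · rw [if_pos (by exact_mod_cast hc)]
        · intro k hk; have := hall k hk; omega
        · intro k hk
          rcases Nat.lt_succ_iff_lt_or_eq.mp hk with h | h
          · have := hall k h; omega
          · rw [h]
      · refine Or.inl ⟨?_, ?_⟩
        · intro k hk
          rcases Nat.lt_succ_iff_lt_or_eq.mp hk with h | h
          · exact hall k h
          · rw [h]; omega
        · rw [if_neg (by exact_mod_cast hc)]
    · rw [heq]
      by_cases hc : arr.getD len 0 > arr.getD j 0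
      · refine Or.inr ⟨len, by omega, by omega, ?_, ?_, ?_⟩
        · rw [if_pos (by exact_mod_cast hc)]
        · intro k hk
          have := hmax k (by omega)
          omega
        · intro k hk
          rcases Nat.lt_succ_iff_lt_or_eq.mp hk with h | h
          · have := hmax k h; omega
          · rw [h]
      · refine Or.inr ⟨j, by omega, hx, ?_, hstrict, ?_⟩
        · rw [if_neg (by exact_mod_cast hc)]
        · intro k hk
          rcases Nat.lt_succ_iff_lt_or_eq.mp hk with h | h
          · exact hmax k h
          · rw [h]; omega

-- A's maxTup fold, as written in the port, in terms of getD
theorem asel (arr : List Int) :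
    ((∀ k < arr.length, arr.getD k 0 ≤ -1) ∧
      (PySem.List.pyRange 0 (arr.length : Int)).foldl
        (fun t i => if PySem.List.pyGetD arr i 0 > t.2 then (i, PySem.List.pyGetD arr i 0) else t)
        (-1, -1) = (-1, -1)) ∨
    (∃ j < arr.length, -1 < arr.getD j 0 ∧
      (PySem.List.pyRange 0 (arr.length : Int)).foldl
        (fun t i => if PySem.List.pyGetD arr i 0 > t.2 then (i, PySem.List.pyGetD arr i 0) else t)
        (-1, -1) = ((j : Int), arr.getD j 0) ∧
      (∀ k < j, arr.getD k 0 < arr.getD j 0) ∧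
      (∀ k < arr.length, arr.getD k 0 ≤ arr.getD j 0)) := by
  have hbridge : (PySem.List.pyRange 0 (arr.length : Int)).foldl
        (fun t i => if PySem.List.pyGetD arr i 0 > t.2 then (i, PySem.List.pyGetD arr i 0) else t)
        (-1, -1)
      = (List.range arr.length).foldl
        (fun t i => if arr.getD i 0 > t.2 then ((i : Int), arr.getD i 0) else t)
        (-1, -1) := by
    rw [PySem.List.pyRange_zero_natCast, List.foldl_map]
    simp only [PySem.List.pyGetD_natCast]
  rw [hbridge]
  exact goA_spec arr arr.length

-- B's max/index selection
theorem bsel (arr : List Int) (h : arr ≠ []) :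
    ∃ (mx : Int) (j : Nat), PySem.List.max? arr (fun x => x) = some mx ∧
      PySem.List.index? arr mx = some j ∧ j < arr.length ∧ arr.getD j 0 = mx ∧
      (∀ k < j, arr.getD k 0 < mx) ∧ (∀ k < arr.length, arr.getD k 0 ≤ mx) := by
  obtain ⟨mx, hmx⟩ : ∃ mx, PySem.List.max? arr (fun x => x) = some mx := by
    cases hm : PySem.List.max? arr (fun x => x) with
    | none => exact absurd ((PySem.List.max?_eq_none_iff arr _).mp hm) h
    | some m => exact ⟨m, rfl⟩
  have hmem : mx ∈ arr := PySem.List.max?_mem hmx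
  have hmax : ∀ y ∈ arr, y ≤ mx := PySem.List.max?_isMax hmx
  obtain ⟨j, hj⟩ : ∃ j, List.idxOf? mx arr = some j := by
    cases hi : List.idxOf? mx arr with
    | none => exact absurd (List.isSome_idxOf?.mpr hmem) (by rw [hi]; simp)
    | some j => exact ⟨j, rfl⟩
  obtain ⟨hjl, hjv, hjne⟩ := List.idxOf?_eq_some_iff.mp hj
  refine ⟨mx, j, hmx, hj, hjl, ?_, ?_, ?_⟩
  · rw [List.getD_eq_getElem _ _ hjl, hjv]
  · intro k hk
    have hkl : k < arr.length := by omega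
    rw [List.getD_eq_getElem _ _ hkl]
    have h1 : arr[k] ≤ mx := hmax _ (List.getElem_mem hkl)
    have h2 : arr[k] ≠ mx := hjne k hk
    omega
  · intro k hk
    rw [List.getD_eq_getElem _ _ hk]
    exact hmax _ (List.getElem_mem hk)

theorem redis_eq (arr : List Int) (h : arr ≠ []) (hx : ∃ x ∈ arr, 0 ≤ x) :
    redisA arr = redisB arr := by
  have hL : 0 < arr.length := List.length_pos_iff.mpr h
  -- some slot is > -1
  obtain ⟨x, hxm, hx0⟩ := hx
  obtain ⟨kx, hkx, hkxv⟩ := List.mem_iff_getElem.mp hxm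
  have hsome : ∃ k < arr.length, -1 < arr.getD k 0 := by
    exact ⟨kx, hkx, by rw [List.getD_eq_getElem _ _ hkx, hkxv]; omega⟩
  -- A's selection
  rcases asel arr with ⟨hall, _⟩ | ⟨j, hj, hjx, heq, hstrict, hmax⟩
  · obtain ⟨k, hk, hkv⟩ := hsome; exact absurd (hall k hk) (by omega)
  -- B's selection
  obtain ⟨mx, jb, hmx, hjB, hjbl, hjbv, hbstrict, hbmax⟩ := bsel arr h
  -- the two selected indices coincide
  have hjb : jb = j := by
    by_cases hlt : jb < j
    · have h1 := hstrict jb hlt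
      have h2 := hbmax j hj
      omega
    · by_cases hgt : j < jb
      · have h1 := hbstrict j hgt
        have h2 := hmax jb hjbl
        omega
      · omega
  subst hjb
  have hveq : mx = arr.getD jb 0 := hjbv.symm
  subst hveq
  set v := arr.getD jb 0 with hvdef
  have hv0 : 0 ≤ v := by have := hmax kx hkx; rw [List.getD_eq_getElem _ _ hkx, hkxv] at this; omega
  -- close A side to an explicit form
  have hA : redisA arr = distA (arr.set jb 0) v ((jb : Int) + 1) := by
    rw [redisA, heq]
    simp only []
    rw [PySem.List.pyGetD_natCast, pySet_natCast]
  have hB : redisB arr =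
      (if 0 < v then
        (PySem.List.pyRange 0 (PySem.Int.mod v (arr.length : Int))).foldl
          (fun a k =>
            pySet a (PySem.Int.mod ((jb : Int) + 1 + k) (arr.length : Int))
              (PySem.List.pyGetD a (PySem.Int.mod ((jb : Int) + 1 + k) (arr.length : Int)) 0 + 1))
          ((arr.set jb 0).map (fun x => x + PySem.Int.floordiv v (arr.length : Int)))
      else arr.set jb 0) := by
    rw [redisB, hmx]
    simp only [hjB, Option.getD_some]
    rw [← hvdef]
  rw [hA, hB]
  by_cases hv : 0 < v
  · rw [if_pos hv]
    have hL0 : (0:Int) < (arr.length : Int) := by exact_mod_cast hL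
    have hmd : PySem.Int.mod v (arr.length : Int) = v % (arr.length : Int) :=
      PySem.Int.mod_eq_emod_of_pos hL0
    have hfd : PySem.Int.floordiv v (arr.length : Int) = v / (arr.length : Int) :=
      PySem.Int.floordiv_eq_ediv_of_pos hL0
    have hrem0 : 0 ≤ v % (arr.length : Int) := Int.emod_nonneg _ (by omega)
    have hremL : v % (arr.length : Int) < (arr.length : Int) := Int.emod_lt_of_pos _ hL0
    have hrcast : v % (arr.length : Int) = (((v % (arr.length : Int)).toNat : Nat) : Int) := by omega
    have hvcast : v = ((v.toNat : Nat) : Int) := by omega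
    rw [hmd, hrcast]
    set a2 := (arr.set jb 0).map (fun x => x + PySem.Int.floordiv v (arr.length : Int)) with ha2
    have ha2len : a2.length = arr.length := by rw [ha2]; simp
    have ha2get : ∀ i, i < arr.length →
        a2.getD i 0 = (arr.set jb 0).getD i 0 + v / (arr.length : Int) := by
      intro i hi
      rw [ha2, List.getD_eq_getElem _ _ (by simpa using hi), List.getElem_map,
        ← List.getD_eq_getElem _ _ (by simpa using hi), hfd]
    obtain ⟨rlen, rget⟩ := remFold_getD jb ((arr.length : Int)) (v % (arr.length : Int)).toNat a2
      (by rw [ha2len]) (by omega) (by omega)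
    obtain ⟨dlen, dget⟩ := distA_getD v.toNat (arr.set jb 0) ((jb : Int) + 1)
      (by simpa using hL) (by omega) (by simp; omega)
    apply List.ext_getElem
    · rw [rlen, ha2len]
      conv_lhs => rw [hvcast]
      rw [dlen]
      simp
    · intro i h1 h2
      have hi : i < arr.length := by
        rw [rlen, ha2len] at h2
        exact h2
      rw [← List.getD_eq_getElem _ _ h1, ← List.getD_eq_getElem _ _ h2]
      rw [rget i (by rw [ha2len]; exact hi), ha2get i hi]
      conv_lhs => rw [hvcast]
      rw [dget i (by simpa using hi)]
      unfold cnt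
      rw [← hvcast, ← hrcast]
      simp only [List.length_set]
      ring
  · rw [if_neg hv]
    have hv0' : v = 0 := by omega
    conv_lhs => rw [distA]
    rw [if_neg (by omega)]

theorem redis_inv (arr : List Int) (h : arr ≠ []) (hx : ∃ x ∈ arr, 0 ≤ x) :
    redisA arr ≠ [] ∧ ∃ x ∈ redisA arr, 0 ≤ x := by
  have hL : 0 < arr.length := List.length_pos_iff.mpr h
  obtain ⟨x, hxm, hx0⟩ := hx
  obtain ⟨kx, hkx, hkxv⟩ := List.mem_iff_getElem.mp hxm
  rcases asel arr with ⟨hall, _⟩ | ⟨j, hj, hjx, heq, hstrict, hmax⟩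
  · exact absurd (hall kx hkx) (by rw [List.getD_eq_getElem _ _ hkx, hkxv]; omega)
  have hA : redisA arr = distA (arr.set j 0) (arr.getD j 0) ((j : Int) + 1) := by
    rw [redisA, heq]
    simp only []
    rw [PySem.List.pyGetD_natCast, pySet_natCast]
  set v := arr.getD j 0 with hvdef
  have hv0 : 0 ≤ v := by
    have := hmax kx hkx
    rw [List.getD_eq_getElem _ _ hkx, hkxv] at this
    omega
  have hvcast : v = ((v.toNat : Nat) : Int) := by omega
  obtain ⟨dlen, dget⟩ := distA_getD v.toNat (arr.set j 0) ((j : Int) + 1)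
    (by simpa using hL) (by omega) (by simp; omega)
  have dlen' : (distA (arr.set j 0) v ((j : Int) + 1)).length = arr.length := by
    rw [hvcast, dlen]; simp
  have dget' : (distA (arr.set j 0) v ((j : Int) + 1)).getD j 0
      = (arr.set j 0).getD j 0 + cnt ((arr.set j 0).length : Int) v ((j : Int) + 1) (j : Int) := by
    rw [hvcast]
    exact dget j (by simpa using hj)
  rw [hA]
  constructor
  · intro hnil
    rw [hnil] at dlen'
    simp at dlen'
    omega
  · have hset0 : (arr.set j 0).getD j 0 = 0 := by
      rw [getD_set _ _ _ _ (by simpa using hj), if_pos rfl]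
    have hcnt : 0 ≤ cnt ((arr.set j 0).length : Int) v ((j : Int) + 1) (j : Int) := by
      unfold cnt
      have h1 : 0 ≤ v / ((arr.set j 0).length : Int) :=
        Int.ediv_nonneg (by omega) (by simp only [List.length_set]; exact_mod_cast Nat.le_of_lt hL)
      split_ifs <;> omega
    refine ⟨(distA (arr.set j 0) v ((j : Int) + 1)).getD j 0, ?_, ?_⟩
    · rw [List.getD_eq_getElem _ _ (by omega)]
      exact List.getElem_mem _
    · rw [dget', hset0]
      omega

theorem loop_eq (f : Nat) : ∀ (l : List (List Int)) (arr : List Int) (n : Int),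
    arr ≠ [] → (∃ x ∈ arr, 0 ≤ x) → calcLoopA l arr n f = calcLoopB l arr n f := by
  induction f with
  | zero => intro l arr n _ _; rfl
  | succ f ih =>
    intro l arr n h hx
    obtain ⟨hne, hinv⟩ := redis_inv arr h hx
    rw [redis_eq arr h hx] at hne hinv
    rw [calcLoopA, calcLoopB, redis_eq arr h hx]
    by_cases hmem : redisB arr ∈ l
    · rw [if_pos hmem, if_pos hmem]
    · rw [if_neg hmem, if_neg hmem]
      exact ih (l ++ [redisB arr]) (redisB arr) (n + 1) hne hinv

theorem allneg_A (arr : List Int) (h : arr ≠ []) (hx : ∀ x ∈ arr, x < 0) :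
    calc_py arr = 2 := by
  have hL : 0 < arr.length := List.length_pos_iff.mpr h
  have hall' : ∀ k < arr.length, arr.getD k 0 ≤ -1 := by
    intro k hk
    rw [List.getD_eq_getElem _ _ hk]
    have := hx _ (List.getElem_mem hk)
    omega
  rcases asel arr with ⟨hall, heq⟩ | ⟨j, hj, hjx, _, _, _⟩
  · -- A zeroes the LAST slot
    have hA1 : redisA arr = arr.set (arr.length - 1) 0 := by
      rw [redisA, heq]
      simp only []
      rw [pyGetD_neg_one arr h, pySet_neg_one, distA,
        if_neg (by have := hall' (arr.length - 1) (by omega); omega)]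
    set a1 := arr.set (arr.length - 1) 0 with ha1
    have ha1len : a1.length = arr.length := by rw [ha1]; simp
    have ha1last : a1.getD (arr.length - 1) 0 = 0 := by
      rw [ha1, getD_set _ _ _ _ (by omega), if_pos rfl]
    have ha1ne : ¬ a1 = arr := by
      intro hE
      have h2 := congrArg (fun l => l.getD (arr.length - 1) 0) hE
      simp only [] at h2
      rw [ha1last] at h2
      have := hall' (arr.length - 1) (by omega)
      omega
    have hA2 : redisA a1 = a1 := by
      rcases asel a1 with ⟨hall2, _⟩ | ⟨j2, hj2, hjx2, heq2, _, _⟩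
      · have := hall2 (arr.length - 1) (by omega)
        rw [ha1last] at this
        omega
      · have hj2len : j2 < arr.length := by rw [ha1len] at hj2; exact hj2
        have hj2' : j2 = arr.length - 1 := by
          by_contra hne2
          have hother : a1.getD j2 0 = arr.getD j2 0 := by
            rw [ha1, getD_set _ _ _ _ hj2len, if_neg (by omega)]
          have := hall' j2 hj2len
          omega
        have hv2 : a1.getD j2 0 = 0 := by rw [hj2', ha1last]
        rw [redisA, heq2]
        simp only []
        rw [PySem.List.pyGetD_natCast, pySet_natCast, hv2, distA, if_neg (by omega)]
        rw [show (0 : Int) = a1[j2]'hj2 from by rw [← List.getD_eq_getElem _ _ hj2, hv2]]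
        exact List.set_getElem_self hj2
    have hf : pvFuel = 18446744073709551614 + 1 + 1 := by norm_num [pvFuel]
    rw [calc_py, hf, calcLoopA]
    rw [hA1, if_neg (by simp [ha1ne]), calcLoopA]
    rw [hA2, if_pos (by simp)]
    norm_num
  · exact absurd (hall' j hj) (by omega)

theorem allneg_B (arr : List Int) (h : arr ≠ []) (hx : ∀ x ∈ arr, x < 0) :
    calc_py_alt arr = 2 := by
  have hL : 0 < arr.length := List.length_pos_iff.mpr h
  have hall' : ∀ k < arr.length, arr.getD k 0 ≤ -1 := by
    intro k hk
    rw [List.getD_eq_getElem _ _ hk]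
    have := hx _ (List.getElem_mem hk)
    omega
  obtain ⟨mx, jb, hmx, hjB, hjbl, hjbv, hbstrict, hbmax⟩ := bsel arr h
  have hmxneg : mx ≤ -1 := by have := hall' jb hjbl; omega
  have hB1 : redisB arr = arr.set jb 0 := by
    rw [redisB, hmx]
    simp only [hjB, Option.getD_some]
    rw [if_neg (by rw [hjbv]; omega)]
  set b1 := arr.set jb 0 with hb1
  have hb1len : b1.length = arr.length := by rw [hb1]; simp
  have hb1jb : b1.getD jb 0 = 0 := by rw [hb1, getD_set _ _ _ _ hjbl, if_pos rfl]
  have hb1ne : ¬ b1 = arr := by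
    intro hE
    have h2 := congrArg (fun l => l.getD jb 0) hE
    simp only [] at h2
    rw [hb1jb] at h2
    have := hall' jb hjbl
    omega
  have hB2 : redisB b1 = b1 := by
    have hb1ne' : b1 ≠ [] := by
      intro hnil
      rw [hnil] at hb1len
      simp at hb1len
      omega
    obtain ⟨mx2, j2, hmx2, hjB2, hj2l, hj2v, hstrict2, hmax2⟩ := bsel b1 hb1ne'
    have hmx2nn : 0 ≤ mx2 := by
      have := hmax2 jb (by omega)
      rw [hb1jb] at this
      omega
    have hj2' : j2 = jb := by
      by_contra hne2
      have hother : b1.getD j2 0 = arr.getD j2 0 := by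
        rw [hb1, getD_set _ _ _ _ (by omega), if_neg (by omega)]
      have := hall' j2 (by omega)
      omega
    have hv2 : b1.getD j2 0 = 0 := by rw [hj2', hb1jb]
    rw [redisB, hmx2]
    simp only [hjB2, Option.getD_some]
    rw [if_neg (by rw [hv2]; omega)]
    rw [show (0 : Int) = b1[j2]'hj2l from by rw [← List.getD_eq_getElem _ _ hj2l, hv2]]
    exact List.set_getElem_self hj2l
  have hf : pvFuel = 18446744073709551614 + 1 + 1 := by norm_num [pvFuel]
  rw [calc_py_alt, hf, calcLoopB]
  rw [hB1, if_neg (by simp [hb1ne]), calcLoopB]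
  rw [hB2, if_pos (by simp)]
  norm_num

-- ===== VERDICT (by name: the statement is the Claim_ definition above) =====
theorem calc_py_spec : Claim_equal_calc_py := by
  intro arr _ hpre
  unfold Spec_calc_py
  by_cases hx : ∃ x ∈ arr, 0 ≤ x
  · exact loop_eq pvFuel [arr] arr 0 hpre hx
  · have hneg : ∀ x ∈ arr, x < 0 := by
      intro x hm
      by_contra hc
      exact hx ⟨x, hm, by omega⟩
    rw [allneg_A arr hpre hneg, allneg_B arr hpre hneg]
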